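-- pv_equiv track=rewrite | github.com/rtehok/perso-python | leetcode/1402_reducing_dishes.py | maxSatisfactionGreedy
-- ===== SOURCE A (Python) =====
-- from typing import List
--
-- def maxSatisfactionGreedy(satisfaction: List[int]) -> int:
--     satisfaction.sort()
--
--     n = len(satisfaction)
--
--     max_satisfaction = 0
--     suffix_sum = 0
--
--     for i in range(n - 1, -1, -1):
--         if suffix_sum + satisfaction[i] > 0:
--             suffix_sum += satisfaction[i]
--             max_satisfaction += suffix_sum
--         else:
--             return max_satisfaction
--
--     return max_satisfaction
-- ===== SOURCE B (Python) =====
-- from typing import List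
--
-- def maxSatisfactionGreedy(satisfaction: List[int]) -> int:
--     satisfaction.sort()
--     # pass 1: walking from the highest dish down, find how many dishes to keep
--     cut = len(satisfaction)
--     s = 0
--     for x in reversed(satisfaction):
--         if s + x > 0:
--             s += x
--             cut -= 1
--         else:
--             break
--     # pass 2: kept dishes in ascending order get time coefficients 1,2,...,k
--     total = 0
--     t = 1
--     for x in satisfaction[cut:]:
--         total += x * t
--         t += 1
--     return total
-- ===== Notes on version B (the rewrite author's own statement) =====
-- stated objective: alternative
-- what changed: Replaces A's single descending loop that accumulates the running suffix sum into the answer with a two-pass decomposition: one descending pass only finds the cutoff (how many dishes to keep), then an ascending pass over the kept slice computes sum(satisfaction[i]*t) with explicit time coefficients t=1..k.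
import Mathlib
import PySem

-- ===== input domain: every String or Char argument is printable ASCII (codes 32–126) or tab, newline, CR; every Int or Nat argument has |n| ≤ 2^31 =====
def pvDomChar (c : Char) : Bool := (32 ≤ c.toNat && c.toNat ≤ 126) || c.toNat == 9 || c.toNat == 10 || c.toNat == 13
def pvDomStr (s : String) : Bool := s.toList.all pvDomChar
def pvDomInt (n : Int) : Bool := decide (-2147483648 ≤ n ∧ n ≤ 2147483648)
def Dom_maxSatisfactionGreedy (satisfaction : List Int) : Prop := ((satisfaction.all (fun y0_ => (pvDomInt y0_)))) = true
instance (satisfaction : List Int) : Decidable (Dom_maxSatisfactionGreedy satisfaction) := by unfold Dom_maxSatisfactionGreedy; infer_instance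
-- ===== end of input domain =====

-- B replaces A's single suffix-accumulating loop by a cutoff pass plus a weighted-sum pass
-- (objective: alternative). Both Pythons sort the argument in place; the equivalence proved
-- here is about the return value.

-- ===== PORT A =====
-- A's loop 'for i in range(n-1, -1, -1)' reads satisfaction[i] on the sorted list, i.e. it
-- traverses the reversed sorted list; ported as structural recursion over that list with the
-- same state (suffix_sum, max_satisfaction) and the same early return.
def pvLoopA : List Int → Int → Int → Int
  | [], _, acc => acc
  | x :: rest, suffixSum, acc =>
      if suffixSum + x > 0 then pvLoopA rest (suffixSum + x) (acc + (suffixSum + x))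
      else acc

def maxSatisfactionGreedy (satisfaction : List Int) : Int :=
  pvLoopA (PySem.List.sorted satisfaction (fun x => x)).reverse 0 0

-- ===== PORT B =====
-- pass 1 of Source B: descending scan counting how many tail dishes are kept ('cut' is tracked
-- as n - kept count; the loop body decrements cut exactly when a dish is kept).
def pvKeepCount : List Int → Int → Nat
  | [], _ => 0
  | x :: rest, s => if s + x > 0 then 1 + pvKeepCount rest (s + x) else 0

-- pass 2 of Source B: ascending fold over the kept slice with state (total, t).
def pvWeightLoop : List Int → Int → Int → Int
  | [], total, _ => total
  | x :: rest, total, t => pvWeightLoop rest (total + x * t) (t + 1)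

def maxSatisfactionGreedy_alt (satisfaction : List Int) : Int :=
  let sortedL := PySem.List.sorted satisfaction (fun x => x)
  let k := pvKeepCount sortedL.reverse 0
  -- satisfaction[cut:] with cut = n - k is the last k elements of the sorted list
  pvWeightLoop (sortedL.drop (sortedL.length - k)) 0 1

-- ===== PRECONDITION & SPEC =====
def Spec_maxSatisfactionGreedy (satisfaction : List Int) (out : Int) : Prop := out = maxSatisfactionGreedy_alt satisfaction
instance (satisfaction : List Int) (out : Int) : Decidable (Spec_maxSatisfactionGreedy satisfaction out) := by unfold Spec_maxSatisfactionGreedy; infer_instance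

-- ===== CLAIM (what is proved, stated in full; the proofs are below) =====
def Claim_equal_maxSatisfactionGreedy : Prop := ∀ (satisfaction : List Int), Dom_maxSatisfactionGreedy satisfaction → Spec_maxSatisfactionGreedy satisfaction (maxSatisfactionGreedy satisfaction)

-- ===== LEMMAS AND PROOFS =====

-- weighted sum of a descending kept list: the first (latest-eaten) element has the largest coefficient
def pvG : List Int → Int
  | [] => 0
  | x :: rest => x * ((rest.length : Int) + 1) + pvG rest

theorem pvKeepCount_le_length (r : List Int) (s : Int) : pvKeepCount r s ≤ r.length := by
  induction r generalizing s with
  | nil => simp [pvKeepCount]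
  | cons x rest ih =>
      simp only [pvKeepCount, List.length_cons]
      split
      · have := ih (s + x); omega
      · omega

theorem pvLoopA_eq (r : List Int) (s acc : Int) :
    pvLoopA r s acc = acc + (pvKeepCount r s : Int) * s + pvG (r.take (pvKeepCount r s)) := by
  induction r generalizing s acc with
  | nil => simp [pvLoopA, pvKeepCount, pvG]
  | cons x rest ih =>
      by_cases h : s + x > 0
      · have hk : pvKeepCount (x :: rest) s = 1 + pvKeepCount rest (s + x) := by
          simp [pvKeepCount, h]
        rw [hk]
        simp only [pvLoopA, if_pos h]
        rw [ih (s + x) (acc + (s + x))]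
        have htake : (x :: rest).take (1 + pvKeepCount rest (s + x))
            = x :: rest.take (pvKeepCount rest (s + x)) := by
          rw [Nat.add_comm]; rfl
        rw [htake]
        have hlen : ((rest.take (pvKeepCount rest (s + x))).length : Int)
            = (pvKeepCount rest (s + x) : Int) := by
          have := pvKeepCount_le_length rest (s + x)
          simp [List.length_take, Nat.min_eq_left this]
        simp only [pvG, hlen]
        push_cast
        ring
      · have hk : pvKeepCount (x :: rest) s = 0 := by simp [pvKeepCount, h]
        rw [hk]
        simp [pvLoopA, h, pvG]

theorem pvWeightLoop_append (xs : List Int) (x total t : Int) :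
    pvWeightLoop (xs ++ [x]) total t = pvWeightLoop xs total t + x * (t + (xs.length : Int)) := by
  induction xs generalizing total t with
  | nil => simp [pvWeightLoop]
  | cons y rest ih =>
      simp only [List.cons_append, pvWeightLoop, ih, List.length_cons]
      push_cast
      ring

theorem pvWeightLoop_reverse (xs : List Int) :
    pvWeightLoop xs.reverse 0 1 = pvG xs := by
  induction xs with
  | nil => rfl
  | cons x rest ih =>
      simp only [List.reverse_cons, pvWeightLoop_append, ih, pvG, List.length_reverse]
      ring

theorem pvDrop_eq_take_reverse (l : List Int) (k : Nat) (_hk : k ≤ l.length) :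
    l.drop (l.length - k) = (l.reverse.take k).reverse := by
  rw [List.take_reverse, List.reverse_reverse]

-- ===== VERDICT (by name: the statement is the Claim_ definition above) =====
theorem maxSatisfactionGreedy_spec : Claim_equal_maxSatisfactionGreedy := by
  intro satisfaction _
  unfold Spec_maxSatisfactionGreedy maxSatisfactionGreedy maxSatisfactionGreedy_alt
  set l := PySem.List.sorted satisfaction (fun x => x) with hl
  set k := pvKeepCount l.reverse 0 with hk
  have hkle : k ≤ l.length := by
    have := pvKeepCount_le_length l.reverse 0
    simpa using this
  rw [pvLoopA_eq]
  show _ = pvWeightLoop (l.drop (l.length - k)) 0 1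
  rw [pvDrop_eq_take_reverse l k hkle, pvWeightLoop_reverse]
  rw [hk]; ring
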